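-- pv_equiv track=rewrite | github.com/gutoalvim/femder | femder/rayinidir.py | nverts2depth
-- ===== SOURCE A (Python) =====
-- def nverts2depth(nverts):
--     '''Returns the minimum number of iterations, `depth`, to tessellate a
--     sphere with `nverts` vertices'''
--     nv = 12  # num of vertices of an icosahedron
--     nf = 20  # num of faces of an icosahedron
--     ne = 30  # num of edges of an icosahedron
--     depth = 1  # iteration
--     while nv < nverts:
--         depth += 1
--         nv += ne
--         ne = 2*ne + 3*nf
--         nf *= 4
--     return depth
-- ===== SOURCE B (Python) =====
-- def nverts2depth(nverts):
--     '''Returns the minimum number of iterations, `depth`, to tessellate a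
--     sphere with `nverts` vertices'''
--     if nverts <= 12:
--         return 1
--     # number of vertices after k subdivisions is 10*4**k + 2; find least k >= 1
--     m = -(-(nverts - 2) // 10)          # ceil((nverts-2)/10): least m with 10*m+2 >= nverts
--     return ((m - 1).bit_length() + 1) // 2 + 1
-- ===== Notes on version B (the rewrite author's own statement) =====
-- stated objective: alternative
-- what changed: Replaced the iterative vertex/edge/face state loop by a closed-form computation: ceil-divide the vertex excess and read the subdivision depth off the bit length of the quotient, using the icosphere vertex-count formula.
import Mathlib
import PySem

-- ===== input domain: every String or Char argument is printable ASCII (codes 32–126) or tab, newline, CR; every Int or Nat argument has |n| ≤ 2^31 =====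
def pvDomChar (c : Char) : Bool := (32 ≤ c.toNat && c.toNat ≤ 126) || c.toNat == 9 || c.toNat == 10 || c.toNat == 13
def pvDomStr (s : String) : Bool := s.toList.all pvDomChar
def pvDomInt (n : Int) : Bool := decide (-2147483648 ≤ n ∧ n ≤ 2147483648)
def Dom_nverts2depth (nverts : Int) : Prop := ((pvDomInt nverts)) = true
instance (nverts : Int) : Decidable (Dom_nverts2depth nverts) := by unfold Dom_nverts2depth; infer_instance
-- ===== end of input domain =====

-- B replaces A's subdivision loop by a closed-form formula (ceil division + bit length); alternative algorithm, same values.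

-- ===== PORT A =====
-- the while loop of A; hne/hnf only justify termination (ne stays positive, nf nonnegative)
def nvLoop (nverts nv ne nf depth : Int) (hne : 0 < ne) (hnf : 0 ≤ nf) : Int :=
  if h : nv < nverts then
    nvLoop nverts (nv + ne) (2 * ne + 3 * nf) (nf * 4) (depth + 1) (by omega) (by omega)
  else depth
termination_by (nverts - nv).toNat
decreasing_by omega

def nverts2depth (nverts : Int) : Int :=
  nvLoop nverts 12 30 20 1 (by norm_num) (by norm_num)

-- ===== PORT B =====
-- (m-1).bit_length() ported as PySem.Int.bitLength; '//' ported as PySem.Int.floordiv (exact);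
-- Python's '(x + 1) // 2' on the nonnegative bit length is Nat division
def nverts2depth_alt (nverts : Int) : Int :=
  if nverts ≤ 12 then 1
  else
    let m : Int := -(PySem.Int.floordiv (-(nverts - 2)) 10)
    ((PySem.Int.bitLength (m - 1) + 1) / 2 : Nat) + 1

-- ===== PRECONDITION & SPEC =====
def Spec_nverts2depth (nverts : Int) (out : Int) : Prop := out = nverts2depth_alt nverts
instance (nverts : Int) (out : Int) : Decidable (Spec_nverts2depth nverts out) := by unfold Spec_nverts2depth; infer_instance

-- ===== CLAIM (what is proved, stated in full; the proofs are below) =====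
def Claim_equal_nverts2depth : Prop := ∀ (nverts : Int), Dom_nverts2depth nverts → Spec_nverts2depth nverts (nverts2depth nverts)

-- ===== LEMMAS AND PROOFS =====

theorem nvLoop_stop (nverts nv ne nf depth : Int) (hne : 0 < ne) (hnf : 0 ≤ nf)
    (h : ¬ nv < nverts) : nvLoop nverts nv ne nf depth hne hnf = depth := by
  rw [nvLoop]; simp [h]

theorem nvLoop_step (nverts nv ne nf depth : Int) (hne : 0 < ne) (hnf : 0 ≤ nf)
    (h : nv < nverts) :
    nvLoop nverts nv ne nf depth hne hnf =
      nvLoop nverts (nv + ne) (2 * ne + 3 * nf) (nf * 4) (depth + 1) (by omega) (by omega) := by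
  rw [nvLoop]; simp [h]

theorem nvLoop_congr (nverts : Int) {nv nv' ne ne' nf nf' depth depth' : Int}
    (h1 : nv = nv') (h2 : ne = ne') (h3 : nf = nf') (h4 : depth = depth')
    (p1 : 0 < ne) (p2 : 0 ≤ nf) (q1 : 0 < ne') (q2 : 0 ≤ nf') :
    nvLoop nverts nv ne nf depth p1 p2 = nvLoop nverts nv' ne' nf' depth' q1 q2 := by
  subst h1; subst h2; subst h3; subst h4; rfl

theorem nvLoop_run : ∀ (d i : Nat) (n : Int)
    (hne : 0 < 30 * (4:Int)^i) (hnf : 0 ≤ 20 * (4:Int)^i),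
    n ≤ 10 * (4:Int)^(i+d) + 2 →
    (∀ t : Nat, t < d → 10 * (4:Int)^(i+t) + 2 < n) →
    nvLoop n (10 * (4:Int)^i + 2) (30 * (4:Int)^i) (20 * (4:Int)^i) ((i:Int)+1) hne hnf
      = (i:Int) + (d:Int) + 1 := by
  intro d
  induction d with
  | zero =>
    intro i n hne hnf hle _
    rw [nvLoop_stop]
    · push_cast; ring
    · simp only [Nat.add_zero] at hle; omega
  | succ d ih =>
    intro i n hne hnf hle hlt
    have h0 : 10 * (4:Int)^(i+0) + 2 < n := hlt 0 (Nat.succ_pos d)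
    simp only [Nat.add_zero] at h0
    rw [nvLoop_step _ _ _ _ _ _ _ h0]
    have e1 : 10 * (4:Int)^i + 2 + 30 * (4:Int)^i = 10 * (4:Int)^(i+1) + 2 := by ring
    have e2 : 2 * (30 * (4:Int)^i) + 3 * (20 * (4:Int)^i) = 30 * (4:Int)^(i+1) := by ring
    have e3 : 20 * (4:Int)^i * 4 = 20 * (4:Int)^(i+1) := by ring
    have e4 : ((i:Int) + 1) + 1 = ((i+1 : Nat) : Int) + 1 := by push_cast; ring
    rw [nvLoop_congr n e1 e2 e3 e4 (by omega) (by omega) (by positivity) (by positivity)]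
    rw [ih (i+1) n (by positivity) (by positivity)
      (by have : i + 1 + d = i + (d+1) := by omega
          rw [this]; exact hle)
      (by intro t ht
          have : i + 1 + t = i + (t+1) := by omega
          rw [this]; exact hlt (t+1) (by omega))]
    push_cast; ring

-- B's closed form on the j-th band: 10*4^(j-1)+2 < n ≤ 10*4^j+2 gives depth j+1
theorem alt_closed (j : Nat) (hj : 1 ≤ j) (n : Int)
    (h1 : 10 * (4:Int)^(j-1) + 2 < n) (h2 : n ≤ 10 * (4:Int)^j + 2) :
    nverts2depth_alt n = (j:Int) + 1 := by
  have hpow1 : (1:Int) ≤ (4:Int)^(j-1) := one_le_pow₀ (by norm_num)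
  have hgt : ¬ n ≤ 12 := by omega
  unfold nverts2depth_alt
  rw [if_neg hgt]
  set M : Int := -(PySem.Int.floordiv (-(n - 2)) 10) with hM
  have hbr : (M - 1) * 10 < n - 2 ∧ n - 2 ≤ M * 10 :=
    (PySem.Int.neg_floordiv_neg_eq_iff_of_pos (a := n - 2) (b := 10) (q := M)
      (by norm_num)).mp rfl
  have h4j : (4:Int)^j = 4 * (4:Int)^(j-1) := by
    conv_lhs => rw [show j = (j-1) + 1 by omega]
    ring
  -- bracket M between the powers of 4
  have hMlo : (4:Int)^(j-1) + 1 ≤ M := by nlinarith [hbr.2, h1]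
  have hMhi : M ≤ (4:Int)^j := by nlinarith [hbr.1, h2]
  -- natAbs bounds
  have hcast1 : ((4^(j-1) : Nat) : Int) = (4:Int)^(j-1) := by push_cast; ring
  have hcast2 : ((4^j : Nat) : Int) = (4:Int)^j := by push_cast; ring
  have hlo : 4^(j-1) ≤ (M - 1).natAbs := by
    have : ((4^(j-1) : Nat) : Int) ≤ M - 1 := by rw [hcast1]; omega
    omega
  have hhi : (M - 1).natAbs < 4^j := by
    have : M - 1 < ((4^j : Nat) : Int) := by rw [hcast2]; omega
    omega
  set s := PySem.Int.bitLength (M - 1) with hs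
  have hub : (M - 1).natAbs < 2 ^ s := PySem.Int.lt_two_pow_bitLength (M - 1)
  have hne0 : M - 1 ≠ 0 := by
    have : (1:Int) ≤ M - 1 := by linarith
    omega
  have hlb : 2 ^ (s - 1) ≤ (M - 1).natAbs := PySem.Int.two_pow_bitLength_le (M - 1) hne0
  have e41 : (4:Nat)^(j-1) = 2 ^ (2*(j-1)) := by rw [pow_mul]; norm_num
  have e42 : (4:Nat)^j = 2 ^ (2*j) := by rw [pow_mul]; norm_num
  -- 2*(j-1) < s
  have hs_lo : 2*(j-1) < s := by
    have : (2:Nat) ^ (2*(j-1)) < 2 ^ s := lt_of_le_of_lt (e41 ▸ hlo) hub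
    exact (Nat.pow_lt_pow_iff_right (by norm_num)).mp this
  -- s - 1 < 2*j
  have hs_hi : s - 1 < 2*j := by
    have : (2:Nat) ^ (s-1) < 2 ^ (2*j) := lt_of_le_of_lt hlb (e42 ▸ hhi)
    exact (Nat.pow_lt_pow_iff_right (by norm_num)).mp this
  have hk : (s + 1) / 2 = j := by omega
  rw [hs] at hk
  show (((PySem.Int.bitLength (M - 1) + 1) / 2 : Nat) : Int) + 1 = (j:Int) + 1
  rw [hk]

-- ===== VERDICT (by name: the statement is the Claim_ definition above) =====
theorem nverts2depth_spec : Claim_equal_nverts2depth := by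
  intro n _
  unfold Spec_nverts2depth
  by_cases h12 : n ≤ 12
  · unfold nverts2depth
    rw [nvLoop_stop _ _ _ _ _ _ _ (by omega)]
    unfold nverts2depth_alt
    rw [if_pos h12]
  · -- least j with n ≤ 10*4^j + 2 exists
    have hex : ∃ t : Nat, n ≤ 10 * (4:Int)^t + 2 := by
      refine ⟨n.toNat, ?_⟩
      have h1 : (n.toNat : Int) ≤ (4:Int)^(n.toNat) := by
        exact_mod_cast (Nat.lt_pow_self (by norm_num)).le
      have h2 : (4:Int)^(n.toNat) ≤ 10 * (4:Int)^(n.toNat) := by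
        nlinarith [pow_pos (show (0:Int) < 4 by norm_num) n.toNat]
      omega
    set j := Nat.find hex with hj
    have hspec : n ≤ 10 * (4:Int)^j + 2 := Nat.find_spec hex
    have hj1 : 1 ≤ j := by
      rcases Nat.eq_zero_or_pos j with h | h
      · exfalso
        have := hspec
        rw [h] at this
        simp at this; omega
      · exact h
    have hmin : 10 * (4:Int)^(j-1) + 2 < n := by
      have := Nat.find_min hex (m := j - 1) (by omega)
      omega
    have hA : nverts2depth n = (j:Int) + 1 := by
      unfold nverts2depth
      rw [nvLoop_congr n (nv' := 10 * (4:Int)^0 + 2) (ne' := 30 * (4:Int)^0)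
        (nf' := 20 * (4:Int)^0) (depth' := ((0:Nat):Int) + 1)
        (by norm_num) (by norm_num) (by norm_num) (by norm_num)
        (by norm_num) (by norm_num) (by norm_num) (by norm_num)]
      rw [nvLoop_run j 0 n (by norm_num) (by norm_num)
        (by simpa using hspec)
        (by intro t ht
            have := Nat.find_min hex (m := t) ht
            simpa using by omega)]
      push_cast; ring
    rw [hA, alt_closed j hj1 n hmin hspec]
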